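-- pv_equiv track=rewrite | github.com/Trice99/advent-of-code-2025 | day_1/solution.py | process_rotations
-- ===== SOURCE A (Python) =====
-- def process_rotations(rotations):
--     position = 50
--     count_zero = 0
--
--     for direction, distance in rotations:
--         step = -1 if direction == 'L' else 1
--         position = (position + step * distance) % 100
--         if position == 0:
--             count_zero += 1
--
--     return count_zero
-- ===== SOURCE B (Python) =====
-- def process_rotations(rotations):
--     # Divide and conquer: convert to signed steps, then recursively count
--     # zero-positions of a segment; each call returns (count, segment sum) so
--     # the right half's start position is base + left sum. Correct because the
--     # position after prefix i is (50 + sum(steps[:i+1])) % 100.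
--     steps = [-dist if direction == 'L' else dist for direction, dist in rotations]
--     return _count(steps, 50)[0]
--
-- def _count(steps, base):
--     if not steps:
--         return (0, 0)
--     if len(steps) == 1:
--         return (1 if (base + steps[0]) % 100 == 0 else 0, steps[0])
--     mid = len(steps) // 2
--     c1, s1 = _count(steps[:mid], base)
--     c2, s2 = _count(steps[mid:], base + s1)
--     return (c1 + c2, s1 + s2)
-- ===== Notes on version B (the rewrite author's own statement) =====
-- stated objective: alternative
-- what changed: Replaces the single left-to-right running-position loop with a divide-and-conquer recursion: each half returns (zero-hit count, segment step sum), and the right half is counted starting from base plus the left half's sum.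
import Mathlib
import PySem

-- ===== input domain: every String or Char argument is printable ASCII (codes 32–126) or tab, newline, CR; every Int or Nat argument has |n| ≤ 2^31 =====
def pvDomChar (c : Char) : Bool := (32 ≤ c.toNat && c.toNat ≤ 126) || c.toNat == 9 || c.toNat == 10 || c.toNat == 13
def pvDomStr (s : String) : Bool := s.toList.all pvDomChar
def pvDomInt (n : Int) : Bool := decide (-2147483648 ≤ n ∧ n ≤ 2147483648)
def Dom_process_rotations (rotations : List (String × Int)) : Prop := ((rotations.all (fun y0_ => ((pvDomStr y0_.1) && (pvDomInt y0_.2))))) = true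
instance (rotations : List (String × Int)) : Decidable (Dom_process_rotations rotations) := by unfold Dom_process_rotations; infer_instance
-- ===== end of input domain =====

-- B replaces A's single running-position loop by a divide-and-conquer recursion
-- returning (zero-hit count, segment step sum); alternative decomposition, no speed claim.

-- ===== PORT A =====
def process_rotations (rotations : List (String × Int)) : Int :=
  (rotations.foldl (fun (st : Int × Int) r =>
    let step : Int := if r.1 == "L" then -1 else 1
    let position := PySem.Int.mod (st.1 + step * r.2) 100
    (position, if position == 0 then st.2 + 1 else st.2)) (50, 0)).2

-- ===== PORT B =====
-- _count from Source B: divide and conquer on the step list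
def pvCount (steps : List Int) (base : Int) : Int × Int :=
  match steps with
  | [] => (0, 0)
  | [x] => (if PySem.Int.mod (base + x) 100 == 0 then 1 else 0, x)
  | x :: y :: t =>
    let xs := x :: y :: t
    let mid := xs.length / 2
    let p1 := pvCount (xs.take mid) base
    let p2 := pvCount (xs.drop mid) (base + p1.2)
    (p1.1 + p2.1, p1.2 + p2.2)
termination_by steps.length
decreasing_by
  · simp [List.length_take]; omega
  · simp [List.length_drop]; omega

def process_rotations_alt (rotations : List (String × Int)) : Int :=
  let steps := rotations.map (fun r => if r.1 == "L" then -r.2 else r.2)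
  (pvCount steps 50).1

-- ===== PRECONDITION & SPEC =====
def Spec_process_rotations (rotations : List (String × Int)) (out : Int) : Prop := out = process_rotations_alt rotations
instance (rotations : List (String × Int)) (out : Int) : Decidable (Spec_process_rotations rotations out) := by unfold Spec_process_rotations; infer_instance

-- ===== CLAIM (what is proved, stated in full; the proofs are below) =====
def Claim_equal_process_rotations : Prop := ∀ (rotations : List (String × Int)), Dom_process_rotations rotations → Spec_process_rotations rotations (process_rotations rotations)

-- ===== LEMMAS AND PROOFS =====

-- linear reference count: zero hits among prefix sums starting from raw base
def cnt : List Int → Int → Int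
  | [], _ => 0
  | x :: t, b => (if PySem.Int.mod (b + x) 100 == 0 then 1 else 0) + cnt t (b + x)

-- A's visited-position count starting from pos (already reduced)
def cntA : List (String × Int) → Int → Int
  | [], _ => 0
  | r :: t, pos =>
      let pos' := PySem.Int.mod (pos + (if r.1 == "L" then -1 else 1) * r.2) 100
      (if pos' == 0 then 1 else 0) + cntA t pos'

lemma foldA_snd (rots : List (String × Int)) : ∀ (pos c : Int),
    (rots.foldl (fun (st : Int × Int) r =>
      let step : Int := if r.1 == "L" then -1 else 1
      let position := PySem.Int.mod (st.1 + step * r.2) 100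
      (position, if position == 0 then st.2 + 1 else st.2)) (pos, c)).2
    = c + cntA rots pos := by
  induction rots with
  | nil => intro pos c; simp [cntA]
  | cons r t ih =>
      intro pos c
      simp only [List.foldl, cntA]
      rw [ih]
      generalize PySem.Int.mod (pos + (if r.1 == "L" then (-1:Int) else 1) * r.2) 100 = q
      by_cases h : (q == 0) = true <;> (simp [h]; try ring)

lemma mod_shift (a b : Int) :
    PySem.Int.mod (PySem.Int.mod a 100 + b) 100 = PySem.Int.mod (a + b) 100 := by
  simp only [PySem.Int.mod_eq_emod_of_pos (show (0:Int) < 100 by norm_num)]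
  omega

-- A's count from a reduced position equals the linear count from the raw base
lemma cntA_eq_cnt (rots : List (String × Int)) : ∀ (b : Int),
    cntA rots (PySem.Int.mod b 100)
    = cnt (rots.map (fun r => if r.1 == "L" then -r.2 else r.2)) b := by
  induction rots with
  | nil => intro b; simp [cntA, cnt]
  | cons r t ih =>
      intro b
      have hstep : (if r.1 == "L" then (-1 : Int) else 1) * r.2
          = (if r.1 == "L" then -r.2 else r.2) := by split <;> ring
      simp only [cntA, List.map, cnt, hstep, mod_shift]
      rw [ih]

lemma cnt_append (l r : List Int) : ∀ (b : Int),
    cnt (l ++ r) b = cnt l b + cnt r (b + l.sum) := by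
  induction l with
  | nil => intro b; simp [cnt]
  | cons x t ih =>
      intro b
      simp only [List.cons_append, cnt, ih, List.sum_cons]
      ring_nf

-- the divide-and-conquer returns (linear count, sum)
lemma pvCount_spec (steps : List Int) (b : Int) :
    pvCount steps b = (cnt steps b, steps.sum) := by
  induction steps, b using pvCount.induct with
  | case1 b => simp [pvCount, cnt]
  | case2 x b => simp [pvCount, cnt]
  | case3 b x y t xs mid p1 ih1 ih2 ih3 =>
      rw [pvCount]
      simp only [xs, mid, p1, ih2] at ih3
      rw [ih2, ih3]
      have h := cnt_append ((x :: y :: t).take ((x :: y :: t).length / 2))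
        ((x :: y :: t).drop ((x :: y :: t).length / 2)) b
      rw [List.take_append_drop] at h
      have hs : ((x :: y :: t).take ((x :: y :: t).length / 2)).sum
          + ((x :: y :: t).drop ((x :: y :: t).length / 2)).sum = (x :: y :: t).sum := by
        rw [← List.sum_append, List.take_append_drop]
      simp only [h, hs]

-- ===== VERDICT (by name: the statement is the Claim_ definition above) =====
theorem process_rotations_spec : Claim_equal_process_rotations := by
  intro rots _
  unfold Spec_process_rotations
  simp only [process_rotations, process_rotations_alt]
  rw [foldA_snd, pvCount_spec]
  have h50 : (50 : Int) = PySem.Int.mod 50 100 := by decide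
  rw [h50, cntA_eq_cnt]
  simp
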